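-- pv_equiv track=rewrite | github.com/dmalzl/metadatamapping | metadatamapping/archs4.py | extract_srx_and_samn_accessions
-- ===== SOURCE A (Python) =====
-- from typing import Union, Iterable, Any
--
-- def get_srx_samn_from_items(relation_items: Iterable[str]) -> tuple[str, str]:
--     """
--     takes list of strings generated from an item in the 'relation' column
--     of the /meta/samples table in the archs4 h5 file and extracts the SRA and
--     BioSample accessions from it
--
--     :param relation_items:   list of strings of the format 'key: value'
--
--     :return:                 sra and bisample accession as strings
--     """
--     srx, samn = None, None
--     for item in relation_items:
--         if not item:
--             continue
--
--         key, value = item.split(': ')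
--
--         if key == 'SRA':
--             srx = value.split('=')[-1]
--
--         if key == 'BioSample':
--             samn = value.split('/')[-1]
--
--     return srx, samn
--
-- def extract_srx_and_samn_accessions(relation_data: Iterable[str]) -> dict[str, list[str]]:
--     """
--     takes the full 'relation' column of the archs4 h5 /meta/samples table and extracts
--     SRA and BioSample accessions for each of the items contained
--
--     :param relation_data:  list of strings of the format 'key1: value1, key2: value2, ...'
--
--     :return:               dictionary containing keys srx_accession, biosample_accession with lists of these accessions as values
--     """
--     srx_samn_accessions = {
--         key: [] for key in ['srx_accession', 'biosample_accession']
--     }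
--     for relation in relation_data:
--         relation_items = relation.split(',')
--         srx, samn = get_srx_samn_from_items(
--             relation_items
--         )
--         srx_samn_accessions['srx_accession'].append(srx)
--         srx_samn_accessions['biosample_accession'].append(samn)
--
--     return srx_samn_accessions
-- ===== SOURCE B (Python) =====
-- def last_match(pairs, key, sep):
--     vals = [v.split(sep)[-1] for k, v in pairs if k == key]
--     return vals[-1] if vals else None
--
-- def extract_srx_and_samn_accessions(relation_data):
--     parsed = [[item.split(': ') for item in relation.split(',') if item]
--               for relation in relation_data]
--     return {
--         'srx_accession': [last_match(p, 'SRA', '=') for p in parsed],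
--         'biosample_accession': [last_match(p, 'BioSample', '/') for p in parsed],
--     }
-- ===== Notes on version B (the rewrite author's own statement) =====
-- stated objective: alternative
-- what changed: B is staged and columnar: one comprehension parses every relation into key/value pairs, then two independent passes each build one output column by filtering the pairs for their key and taking the last match, instead of A's single pass that threads two mutable accumulators through per-key branches inside a helper loop.
import Mathlib
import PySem

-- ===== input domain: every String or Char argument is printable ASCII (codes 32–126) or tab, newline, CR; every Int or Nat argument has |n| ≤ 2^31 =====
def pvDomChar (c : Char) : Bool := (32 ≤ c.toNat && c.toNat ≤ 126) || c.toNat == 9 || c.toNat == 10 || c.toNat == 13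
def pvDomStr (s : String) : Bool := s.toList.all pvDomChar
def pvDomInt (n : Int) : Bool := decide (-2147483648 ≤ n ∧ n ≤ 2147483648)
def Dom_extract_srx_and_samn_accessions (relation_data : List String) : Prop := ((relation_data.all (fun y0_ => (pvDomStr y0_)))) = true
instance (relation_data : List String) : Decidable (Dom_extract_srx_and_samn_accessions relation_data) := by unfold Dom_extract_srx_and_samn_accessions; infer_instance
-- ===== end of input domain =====

-- B parses everything into key/value pairs first, then builds each output column in its own
-- filter-last pass, instead of A's single loop threading two accumulators; equal results are
-- stated for inputs where every non-empty comma-separated item splits on ': ' into exactly two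
-- parts (elsewhere both Pythons raise ValueError).


-- ===== PORT A =====
-- s.split(sep) for a literal non-empty sep: PySem.Str.split? is none only for sep = "", so getD is exact here
def pvSplit (s sep : String) : List String := (PySem.Str.split? s sep).getD []

-- get_srx_samn_from_items: loop over the items threading (srx, samn); `none` = the ValueError
-- of `key, value = item.split(': ')` when the split is not exactly two parts.
def pvItemsLoopA : List String → Option String × Option String → Option (Option String × Option String)
  | [], p => some p
  | item :: rest, p =>
    if item = "" then pvItemsLoopA rest p
    else match pvSplit item ": " with
      | [k, v] =>
        pvItemsLoopA rest
          ((if k = "SRA" then PySem.List.pyGet? (pvSplit v "=") (-1) else p.1),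
           (if k = "BioSample" then PySem.List.pyGet? (pvSplit v "/") (-1) else p.2))
      | _ => none

-- the outer loop of A, appending to the dict's two lists
def pvRelLoopA : List String → List (Option String) × List (Option String) → Option (List (Option String) × List (Option String))
  | [], acc => some acc
  | rel :: rest, acc =>
    match pvItemsLoopA (pvSplit rel ",") (none, none) with
    | some p => pvRelLoopA rest (acc.1 ++ [p.1], acc.2 ++ [p.2])
    | none => none

def extract_srx_and_samn_accessions (relation_data : List String) : List (String × List (Option String)) :=
  match pvRelLoopA relation_data ([], []) with
  | some acc => [("srx_accession", acc.1), ("biosample_accession", acc.2)]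
  | none => []      -- unreachable under Pre_: Python raises ValueError here

-- ===== PORT B =====
-- [item.split(': ') for item in relation.split(',') if item]
def pvParseRel (rel : String) : List (List String) :=
  ((pvSplit rel ",").filter (fun item => item ≠ "")).map (fun item => pvSplit item ": ")

-- vals = [v.split(sep)[-1] for k, v in pairs if k == key]; `none` = the comprehension's
-- ValueError when unpacking a pair that is not exactly two parts (IndexError branch kept for pyGet?)
def pvVals : List (List String) → String → String → Option (List String)
  | [], _, _ => some []
  | p :: rest, key, sep =>
    match p with
    | [k, v] =>
      if k = key then
        match PySem.List.pyGet? (pvSplit v sep) (-1) with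
        | some s => (pvVals rest key sep).map (fun vs => s :: vs)
        | none => none
      else pvVals rest key sep
    | _ => none

-- last_match: vals[-1] if vals else None
def pvLastMatch (pairs : List (List String)) (key sep : String) : Option (Option String) :=
  (pvVals pairs key sep).map (fun vals => vals.getLast?)

def extract_srx_and_samn_accessions_alt (relation_data : List String) : List (String × List (Option String)) :=
  let parsed := relation_data.map pvParseRel
  match parsed.mapM (fun p => pvLastMatch p "SRA" "="),
        parsed.mapM (fun p => pvLastMatch p "BioSample" "/") with
  | some srxs, some samns => [("srx_accession", srxs), ("biosample_accession", samns)]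
  | _, _ => []      -- unreachable under Pre_: Python raises ValueError here

-- ===== PRECONDITION & SPEC =====
-- Pre_ excludes exactly the inputs where some non-empty comma-separated item does not split
-- on ': ' into exactly two parts: there BOTH Pythons raise ValueError.
def Pre_extract_srx_and_samn_accessions (relation_data : List String) : Prop :=
  ∀ rel ∈ relation_data, ∀ item ∈ pvSplit rel ",",
    item ≠ "" → (pvSplit item ": ").length = 2
instance (relation_data : List String) : Decidable (Pre_extract_srx_and_samn_accessions relation_data) := by
  unfold Pre_extract_srx_and_samn_accessions; infer_instance

def pvWitness_extract_srx_and_samn_accessions : List String :=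
  ["SRA: https://www.ncbi.nlm.nih.gov/sra?term=SRX123,BioSample: https://www.ncbi.nlm.nih.gov/biosample/SAMN01", "Foo: bar", ""]

def Spec_extract_srx_and_samn_accessions (relation_data : List String) (out : List (String × List (Option String))) : Prop := out = extract_srx_and_samn_accessions_alt relation_data
instance (relation_data : List String) (out : List (String × List (Option String))) : Decidable (Spec_extract_srx_and_samn_accessions relation_data out) := by unfold Spec_extract_srx_and_samn_accessions; infer_instance

-- ===== CLAIM =====
def Claim_equal_extract_srx_and_samn_accessions : Prop := ∀ (relation_data : List String), Dom_extract_srx_and_samn_accessions relation_data → Pre_extract_srx_and_samn_accessions relation_data → Spec_extract_srx_and_samn_accessions relation_data (extract_srx_and_samn_accessions relation_data)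

-- ===== LEMMAS AND PROOFS =====
theorem go_ne_nil (sep : List Char) : ∀ (fuel : Nat) (l cur : List Char) (acc : List (List Char)),
    PySem.Chars.splitOn.go sep fuel l cur acc ≠ [] := by
  intro fuel
  induction fuel with
  | zero => intro l cur acc; simp [PySem.Chars.splitOn.go]
  | succ n ih =>
    intro l cur acc
    cases l with
    | nil => simp [PySem.Chars.splitOn.go]
    | cons c rest =>
      rw [PySem.Chars.splitOn.go]
      split <;> apply ih

theorem pvSplit_ne_nil (s sep : String) (h : sep.toList ≠ []) : pvSplit s sep ≠ [] := by
  simp [pvSplit, PySem.Str.split?, PySem.Chars.split?, List.isEmpty_iff, h, PySem.Chars.splitOn]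
  exact go_ne_nil _ _ _ _ _

theorem pyGet_neg_one_isSome (l : List String) (h : l ≠ []) :
    (PySem.List.pyGet? l (-1)).isSome := by
  cases l with
  | nil => exact absurd rfl h
  | cons a t => simp [PySem.List.pyGet?, PySem.List.pyIdx?]

-- last-with-default view of A's accumulator
def pvLastD (vs : List String) (d : Option String) : Option String :=
  match vs.getLast? with
  | some s => some s
  | none => d

theorem pvLastD_cons (s : String) (vs : List String) (d : Option String) :
    pvLastD (s :: vs) d = pvLastD vs (some s) := by
  cases vs with
  | nil => rfl
  | cons a t =>
    simp only [pvLastD, List.getLast?_cons_cons]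
    cases h : (a :: t).getLast? with
    | none => simp at h
    | some x => rfl

theorem pvLastD_none (vs : List String) : pvLastD vs none = vs.getLast? := by
  unfold pvLastD; cases vs.getLast? <;> rfl

-- A's item loop, on well-formed items, equals the two filter-last columns of B
theorem pvItemsLoop_eq (items : List String)
    (H : ∀ item ∈ items, item ≠ "" → (pvSplit item ": ").length = 2) :
    ∀ p : Option String × Option String,
      ∃ vs vm, pvVals ((items.filter (fun i => i ≠ "")).map (fun i => pvSplit i ": ")) "SRA" "=" = some vs ∧
               pvVals ((items.filter (fun i => i ≠ "")).map (fun i => pvSplit i ": ")) "BioSample" "/" = some vm ∧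
               pvItemsLoopA items p = some (pvLastD vs p.1, pvLastD vm p.2) := by
  induction items with
  | nil => intro p; exact ⟨[], [], rfl, rfl, rfl⟩
  | cons item rest ih =>
    intro p
    by_cases he : item = ""
    · simpa [pvItemsLoopA, he] using ih (fun i hi => H i (List.mem_cons_of_mem _ hi)) p
    · have hlen := H item (List.mem_cons_self) he
      match hsp : pvSplit item ": " with
      | [] | [_] | _ :: _ :: _ :: _ => simp [hsp] at hlen
      | [k, v] =>
        have ihr := ih (fun i hi => H i (List.mem_cons_of_mem _ hi))
        by_cases hk1 : k = "SRA" <;> by_cases hk2 : k = "BioSample"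
        · exact absurd (hk1 ▸ hk2) (by decide)
        · -- SRA item
          have hne := pvSplit_ne_nil v "=" (by decide)
          obtain ⟨s, hs⟩ := Option.isSome_iff_exists.mp (pyGet_neg_one_isSome _ hne)
          obtain ⟨vs, vm, h1, h2, h3⟩ := ihr ((some s), p.2)
          refine ⟨s :: vs, vm, ?_, ?_, ?_⟩
          · simp [he, pvVals, hsp, hk1, hs]; simpa using h1
          · simp [he, pvVals, hsp, hk2]; simpa using h2
          · simp [pvItemsLoopA, he, hsp, hk1, hs, h3, pvLastD_cons]
        · -- BioSample item
          have hne := pvSplit_ne_nil v "/" (by decide)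
          obtain ⟨s, hs⟩ := Option.isSome_iff_exists.mp (pyGet_neg_one_isSome _ hne)
          obtain ⟨vs, vm, h1, h2, h3⟩ := ihr (p.1, (some s))
          refine ⟨vs, s :: vm, ?_, ?_, ?_⟩
          · simp [he, pvVals, hsp, hk1]; simpa using h1
          · simp [he, pvVals, hsp, hk2, hs]; simpa using h2
          · simp [pvItemsLoopA, he, hsp, hk2, hs, h3, pvLastD_cons]
        · -- other key
          obtain ⟨vs, vm, h1, h2, h3⟩ := ihr p
          refine ⟨vs, vm, ?_, ?_, ?_⟩
          · simp [he, pvVals, hsp, hk1]; simpa using h1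
          · simp [he, pvVals, hsp, hk2]; simpa using h2
          · simp [pvItemsLoopA, he, hsp, hk1, hk2, h3]

theorem pvRelLoop_eq (data : List String)
    (H : ∀ rel ∈ data, ∀ item ∈ pvSplit rel ",", item ≠ "" → (pvSplit item ": ").length = 2) :
    ∀ acc : List (Option String) × List (Option String),
      ∃ srxs samns,
        ((data.map pvParseRel).mapM (fun p => pvLastMatch p "SRA" "=")) = some srxs ∧
        ((data.map pvParseRel).mapM (fun p => pvLastMatch p "BioSample" "/")) = some samns ∧
        pvRelLoopA data acc = some (acc.1 ++ srxs, acc.2 ++ samns) := by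
  induction data with
  | nil => intro acc; exact ⟨[], [], rfl, rfl, by simp [pvRelLoopA]⟩
  | cons rel rest ih =>
    intro acc
    obtain ⟨vs, vm, h1, h2, h3⟩ :=
      pvItemsLoop_eq (pvSplit rel ",") (H rel (List.mem_cons_self)) (none, none)
    obtain ⟨srxs, samns, g1, g2, g3⟩ := ih (fun r hr => H r (List.mem_cons_of_mem _ hr))
      (acc.1 ++ [pvLastD vs none], acc.2 ++ [pvLastD vm none])
    refine ⟨pvLastD vs none :: srxs, pvLastD vm none :: samns, ?_, ?_, ?_⟩
    · simp [pvLastMatch] at g1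
      simp at h1
      simp [List.mapM_cons, pvLastMatch, pvParseRel, pvLastD_none, h1, g1]
    · simp [pvLastMatch] at g2
      simp at h2
      simp [List.mapM_cons, pvLastMatch, pvParseRel, pvLastD_none, h2, g2]
    · simp [pvRelLoopA, h3, g3]

-- ===== VERDICT =====
theorem extract_srx_and_samn_accessions_spec : Claim_equal_extract_srx_and_samn_accessions := by
  intro relation_data _ hpre
  obtain ⟨srxs, samns, h1, h2, h3⟩ := pvRelLoop_eq relation_data hpre ([], [])
  unfold Spec_extract_srx_and_samn_accessions extract_srx_and_samn_accessions extract_srx_and_samn_accessions_alt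
  simp [h1, h2, h3]
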